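-- pv_equiv track=rewrite | github.com/yeseong31/coding-test | 프로그래머스/2/131130. 혼자 놀기의 달인/혼자 놀기의 달인.py | solution
-- ===== SOURCE A (Python) =====
-- def solution(cards):
--     answer = []
--     visited = [False] * len(cards)
--
--     for i in range(len(cards)):
--         if not visited[i]:
--             visited[i] = True
--             cnt = 1
--             t = i
--
--             while not visited[cards[t] - 1]:
--                 cnt += 1
--                 t = cards[t] - 1
--                 visited[t] = True
--
--             answer.append(cnt)
--
--     if len(answer) == 1:
--         return 0
--
--     answer.sort(reverse=True)
--     return answer[0] * answer[1]
-- ===== SOURCE B (Python) =====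
-- def solution(cards):
--     # Label every position with the start that first claims it (one uniform claim
--     # loop, no visited flags, no per-walk counter), then read the group sizes off
--     # the label array: the starts are the self-owned positions.
--     n = len(cards)
--     owner = [-1] * n
--     for i in range(n):
--         v = i
--         while owner[v] < 0:
--             owner[v] = i
--             v = cards[v] - 1
--     lengths = [owner.count(s) for s in range(n) if owner[s] == s]
--     if len(lengths) == 1:
--         return 0
--     s = sorted(lengths)
--     return s[-1] * s[-2]
-- ===== Notes on version B (the rewrite author's own statement) =====
-- stated objective: alternative
-- what changed: B replaces A's visited-boolean walk with per-segment counter and in-loop appends by an owner-labelling pass: one uniform claim loop labels every position with the start that first reaches it (no visited flags, no counter, no guard), and the segment lengths are afterwards read off the label array as the counts of the self-owned positions; the final product uses an ascending sort and negative indexing instead of A's reverse sort.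
-- outside the precondition, e.g. on solution([]): A raises IndexError, B raises IndexError
import Mathlib
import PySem

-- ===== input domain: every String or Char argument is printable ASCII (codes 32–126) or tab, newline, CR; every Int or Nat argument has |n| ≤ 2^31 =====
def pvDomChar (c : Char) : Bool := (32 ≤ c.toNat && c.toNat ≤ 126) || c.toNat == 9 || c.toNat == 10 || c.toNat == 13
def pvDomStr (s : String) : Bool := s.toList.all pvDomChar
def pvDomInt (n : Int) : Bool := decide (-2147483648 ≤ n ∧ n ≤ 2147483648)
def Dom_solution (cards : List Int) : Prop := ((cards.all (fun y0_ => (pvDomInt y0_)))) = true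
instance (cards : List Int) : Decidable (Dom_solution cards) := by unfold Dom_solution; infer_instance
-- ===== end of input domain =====

-- B replaces A's visited-boolean walk (per-segment counter, in-loop appends) by an
-- owner-labelling pass: one uniform claim loop labels each position with the start
-- that first reaches it, and the segment lengths are read off the labels afterwards.

-- ===== PORT A =====
-- inner while loop of A: 'while not visited[cards[t]-1]: cnt += 1; t = cards[t]-1; visited[t] = True'
-- fuel bounds the iteration count (each iteration marks a fresh cell, so 'cards.length' suffices
-- on the admitted inputs); 'none' from an index primitive is a Python IndexError (outside Pre_).
def aWhile (cards : List Int) : Nat → List Bool → Int → Int → List Bool × Int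
  | 0, vis, cnt, _ => (vis, cnt)
  | fuel+1, vis, cnt, t =>
    match PySem.List.pyGet? cards t with
    | none => (vis, cnt)
    | some v =>
      match PySem.List.pyGet? vis (v - 1) with
      | none => (vis, cnt)
      | some b =>
        if b then (vis, cnt)
        else aWhile cards fuel (PySem.List.pySetD vis (v - 1) true) (cnt + 1) (v - 1)

-- one iteration of A's outer 'for i in range(len(cards))'
def stepA (cards : List Int) (fuel : Nat) (st : List Bool × List Int) (i : Nat) : List Bool × List Int :=
  match PySem.List.pyGet? st.1 (i : Int) with
  | some false =>
      let r := aWhile cards fuel (PySem.List.pySetD st.1 (i : Int) true) 1 (i : Int)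
      (r.1, st.2 ++ [r.2])
  | _ => st

def solution (cards : List Int) : Int :=
  let n := cards.length
  let st := (List.range n).foldl (stepA cards n) (List.replicate n false, ([] : List Int))
  if st.2.length = 1 then 0
  else
    let s := PySem.List.sorted st.2 (fun x => x) true
    match PySem.List.pyGet? s 0, PySem.List.pyGet? s 1 with
    | some a, some b => a * b
    | _, _ => 0

-- ===== PORT B =====
-- inner while loop of B: 'while owner[v] < 0: owner[v] = i; v = cards[v] - 1'
-- fuel bounds the iteration count ('cards.length + 1' suffices: each pass but the last
-- claims a fresh cell); 'none' from an index primitive is a Python IndexError (outside Pre_).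
def bClaim (cards : List Int) (i : Nat) : Nat → List Int → Int → List Int
  | 0, own, _ => own
  | fuel+1, own, v =>
    match PySem.List.pyGet? own v with
    | none => own
    | some o =>
      if o < 0 then
        match PySem.List.pyGet? cards v with
        | none => PySem.List.pySetD own v (i : Int)
        | some c => bClaim cards i fuel (PySem.List.pySetD own v (i : Int)) (c - 1)
      else own

def solution_alt (cards : List Int) : Int :=
  let n := cards.length
  let own := (List.range n).foldl (fun own i => bClaim cards i (n + 1) own (i : Int))
    (List.replicate n (-1))
  -- '[owner.count(s) for s in range(n) if owner[s] == s]' ('owner[s]' never raises: s < n)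
  let lengths := ((List.range n).filter (fun (s : Nat) => PySem.List.pyGetD own (s : Int) 0 == (s : Int))).map
    (fun (s : Nat) => ((PySem.List.count own (s : Int) : Nat) : Int))
  if lengths.length = 1 then 0
  else
    let s := PySem.List.sorted lengths (fun x => x) false
    match PySem.List.pyGet? s (-1), PySem.List.pyGet? s (-2) with
    | some a, some b => a * b
    | _, _ => 0

-- ===== PRECONDITION & SPEC =====
-- Exactly the inputs on which the Python A returns: the list is nonempty (on [] A's final
-- indexing raises IndexError) and every value keeps every computed index inside Python's
-- wrapped range, i.e. 1 - n ≤ x ≤ n (outside that A raises IndexError during the walk).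
def Pre_solution (cards : List Int) : Prop :=
  cards ≠ [] ∧ ∀ x ∈ cards, 1 - (cards.length : Int) ≤ x ∧ x ≤ (cards.length : Int)
instance (cards : List Int) : Decidable (Pre_solution cards) := by unfold Pre_solution; infer_instance
def pvWitness_solution : List Int := [2, 3, 1, 5, 4]

def Spec_solution (cards : List Int) (out : Int) : Prop := out = solution_alt cards
instance (cards : List Int) (out : Int) : Decidable (Spec_solution cards out) := by unfold Spec_solution; infer_instance

-- ===== CLAIM (what is proved, stated in full; the proofs are below) =====
def Claim_equal_solution : Prop := ∀ (cards : List Int), Dom_solution cards → Pre_solution cards → Spec_solution cards (solution cards)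

-- ===== LEMMAS AND PROOFS =====

-- Python's wrapped index of i (for -n ≤ i < n) is the index (i % n) of the same cell
lemma pyIdx?_wrap (n : Nat) (i : Int) (h0 : -(n : Int) ≤ i) (h1 : i < (n : Int)) :
    PySem.List.pyIdx? n (PySem.Int.mod i (n : Int)) = PySem.List.pyIdx? n i := by
  have hn : 0 < (n : Int) := by omega
  rw [PySem.Int.mod_eq_emod_of_pos hn]
  by_cases hi : 0 ≤ i
  · rw [Int.emod_eq_of_lt hi h1]
  · have he : i % (n : Int) = i + n := by
      have h2 : (i + (n : Int) * 1) % (n : Int) = i % (n : Int) := Int.add_mul_emod_self_left i (n : Int) 1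
      rw [mul_one] at h2
      rw [← h2, Int.emod_eq_of_lt (by omega) (by omega)]
    rw [he]
    simp only [PySem.List.pyIdx?]
    rw [if_pos (by omega), if_pos (by omega), if_neg hi, if_pos h0]
    congr 1
    omega

lemma mod_range (i : Int) (n : Nat) (hn : 0 < n) :
    0 ≤ PySem.Int.mod i (n : Int) ∧ PySem.Int.mod i (n : Int) < (n : Int) := by
  rw [PySem.Int.mod_eq_emod_of_pos (by omega)]
  exact ⟨Int.emod_nonneg i (by omega), Int.emod_lt_of_pos i (by omega)⟩

lemma canon_lt (t : Int) (n : Nat) (hn : 0 < n) : (PySem.Int.mod t (n : Int)).toNat < n := by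
  have := mod_range t n hn
  omega

-- reading xs[t] with a possibly negative t is reading the canonical cell (t % len)
lemma pyGet_canon {α : Type} (xs : List α) (n : Nat) (hlen : xs.length = n) (t : Int) (d : α)
    (h0 : -(n : Int) ≤ t) (h1 : t < (n : Int)) :
    PySem.List.pyGet? xs t = some (xs.getD (PySem.Int.mod t (n : Int)).toNat d) := by
  have hn : 0 < n := by omega
  have hm := mod_range t n hn
  have hw : PySem.List.pyGet? xs (PySem.Int.mod t (n : Int)) = PySem.List.pyGet? xs t := by
    simp only [PySem.List.pyGet?]
    rw [hlen, pyIdx?_wrap n t h0 h1]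
  rw [← hw, PySem.List.pyGet?_of_nonneg _ hm.1,
    List.getElem?_eq_getElem (by omega), List.getD_eq_getElem _ d (by omega)]

-- writing xs[t] = v with a possibly negative t is writing the canonical cell (t % len)
lemma pySet_canon {α : Type} (xs : List α) (n : Nat) (hlen : xs.length = n) (t : Int) (v : α)
    (h0 : -(n : Int) ≤ t) (h1 : t < (n : Int)) :
    PySem.List.pySetD xs t v = xs.set (PySem.Int.mod t (n : Int)).toNat v := by
  have hn : 0 < n := by omega
  have hm := mod_range t n hn
  have hw : PySem.List.pySetD xs (PySem.Int.mod t (n : Int)) v = PySem.List.pySetD xs t v := by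
    simp only [PySem.List.pySetD, PySem.List.pySet?]
    rw [hlen, pyIdx?_wrap n t h0 h1]
  rw [← hw, PySem.List.pySetD_of_nonneg _ _ hm.1]

lemma pyGetD_of_pyGet? {α : Type} (xs : List α) (t : Int) (v d : α)
    (h : PySem.List.pyGet? xs t = some v) : PySem.List.pyGetD xs t d = v := by
  simp only [PySem.List.pyGetD, h, Option.getD_some]

lemma getD_set {α : Type} (xs : List α) (k : Nat) (hk : k < xs.length) (v : α) (j : Nat) (d : α) :
    (xs.set k v).getD j d = if j = k then v else xs.getD j d := by
  by_cases hj : j < xs.length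
  · rw [List.getD_eq_getElem _ d (by simpa using hj), List.getElem_set,
      List.getD_eq_getElem _ d hj]
    by_cases hjk : j = k
    · rw [if_pos hjk, if_pos (by omega)]
    · rw [if_neg hjk, if_neg (by omega)]
  · rw [List.getD_eq_default _ d (by simpa using Nat.le_of_not_lt hj),
      List.getD_eq_default _ d (by omega), if_neg (by omega)]

-- ===== the two inner loops run in lockstep =====

lemma walkAB (cards : List Int)
    (hb : ∀ x ∈ cards, 1 - (cards.length : Int) ≤ x ∧ x ≤ (cards.length : Int))
    (i : Nat) (_hi : i < cards.length) :
    ∀ (m : Nat) (vis : List Bool) (own : List Int) (cnt t : Int),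
      vis.length = cards.length → own.length = cards.length →
      -(cards.length : Int) ≤ t → t < (cards.length : Int) →
      (∀ j, j < cards.length → (vis.getD j false = true ↔ own.getD j 0 ≠ -1)) →
      (∀ j, j < cards.length → own.getD j 0 = -1 ∨
        (0 ≤ own.getD j 0 ∧ own.getD j 0 ≤ (j : Int) ∧ own.getD j 0 ≤ (i : Int))) →
      (∀ j, j < cards.length → j < i → own.getD j 0 ≠ -1) →
      cnt = ((own.count ((i : Nat) : Int) : Nat) : Int) →
      own.count (-1) + 1 ≤ m →
      ∃ vis' own',
        aWhile cards m vis cnt t = (vis', ((own'.count ((i : Nat) : Int) : Nat) : Int))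
        ∧ bClaim cards i m own (PySem.List.pyGetD cards t 0 - 1) = own'
        ∧ vis'.length = cards.length ∧ own'.length = cards.length
        ∧ (∀ j, j < cards.length → (vis'.getD j false = true ↔ own'.getD j 0 ≠ -1))
        ∧ (∀ j, j < cards.length → own'.getD j 0 = -1 ∨
            (0 ≤ own'.getD j 0 ∧ own'.getD j 0 ≤ (j : Int) ∧ own'.getD j 0 ≤ (i : Int)))
        ∧ (∀ j, j < cards.length → own.getD j 0 ≠ -1 → own'.getD j 0 = own.getD j 0)
        ∧ (∀ b : Int, b ≠ ((i : Nat) : Int) → b ≠ -1 → own'.count b = own.count b) := by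
  intro m
  induction m with
  | zero => intro vis own cnt t _ _ _ _ _ _ _ _ hfuel; omega
  | succ m ih =>
    intro vis own cnt t hvl hol ht0 ht1 hrel hval hlow hcnt hfuel
    have hn : 0 < cards.length := by omega
    -- the value A reads at t, and the common test index w = that value - 1
    have hgc : PySem.List.pyGet? cards t
        = some (cards.getD (PySem.Int.mod t (cards.length : Int)).toNat 0) :=
      pyGet_canon cards cards.length rfl t 0 ht0 ht1
    have hut : (PySem.Int.mod t (cards.length : Int)).toNat < cards.length :=
      canon_lt t cards.length hn
    have hcvmem : cards.getD (PySem.Int.mod t (cards.length : Int)).toNat 0 ∈ cards := by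
      rw [List.getD_eq_getElem cards 0 hut]
      exact List.getElem_mem hut
    obtain ⟨hcv0, hcv1⟩ := hb _ hcvmem
    set w : Int := cards.getD (PySem.Int.mod t (cards.length : Int)).toNat 0 - 1 with hw
    have hw0 : -(cards.length : Int) ≤ w := by omega
    have hw1 : w < (cards.length : Int) := by omega
    set u : Nat := (PySem.Int.mod w (cards.length : Int)).toNat with hu
    have hun : u < cards.length := canon_lt w cards.length hn
    have hgv : PySem.List.pyGet? vis w = some (vis.getD u false) :=
      pyGet_canon vis cards.length hvl w false hw0 hw1
    have hgo : PySem.List.pyGet? own w = some (own.getD u 0) :=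
      pyGet_canon own cards.length hol w 0 hw0 hw1
    have hargB : PySem.List.pyGetD cards t 0 - 1 = w := by
      rw [pyGetD_of_pyGet? cards t _ 0 hgc]
    have hstepA : aWhile cards (m+1) vis cnt t
        = (match PySem.List.pyGet? cards t with
          | none => (vis, cnt)
          | some v =>
            match PySem.List.pyGet? vis (v - 1) with
            | none => (vis, cnt)
            | some b =>
              if b then (vis, cnt)
              else aWhile cards m (PySem.List.pySetD vis (v - 1) true) (cnt + 1) (v - 1)) := rfl
    have hstepB : bClaim cards i (m+1) own (PySem.List.pyGetD cards t 0 - 1)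
        = (match PySem.List.pyGet? own w with
          | none => own
          | some o =>
            if o < 0 then
              match PySem.List.pyGet? cards w with
              | none => PySem.List.pySetD own w (i : Int)
              | some c => bClaim cards i m (PySem.List.pySetD own w (i : Int)) (c - 1)
            else own) := by
      rw [hargB]
      rfl
    have hA2 : aWhile cards (m+1) vis cnt t
        = (match PySem.List.pyGet? vis w with
          | none => (vis, cnt)
          | some b =>
            if b then (vis, cnt)
            else aWhile cards m (PySem.List.pySetD vis w true) (cnt + 1) w) := by
      rw [hstepA, hgc]
    by_cases hclaimed : own.getD u 0 = -1
    · -- the tested cell is unclaimed: A marks it and walks on, B labels it with i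
      have hvfalse : vis.getD u false = false := by
        rcases Bool.eq_false_or_eq_true (vis.getD u false) with h | h
        · exact absurd hclaimed ((hrel u hun).mp h)
        · exact h
      have hgc2 : PySem.List.pyGet? cards w = some (cards.getD u 0) :=
        pyGet_canon cards cards.length rfl w 0 hw0 hw1
      have hvset : PySem.List.pySetD vis w true = vis.set u true :=
        pySet_canon vis cards.length hvl w true hw0 hw1
      have hoset : PySem.List.pySetD own w (i : Int) = own.set u (i : Int) :=
        pySet_canon own cards.length hol w (i : Int) hw0 hw1
      rw [hvfalse] at hgv
      have hA3 : aWhile cards (m+1) vis cnt t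
          = aWhile cards m (vis.set u true) (cnt + 1) w := by
        simp only [hA2, hgv, hvset]
        rfl
      have hB3 : bClaim cards i (m+1) own (PySem.List.pyGetD cards t 0 - 1)
          = bClaim cards i m (own.set u (i : Int)) (cards.getD u 0 - 1) := by
        simp only [hstepB, hgo, hclaimed, hgc2, hoset]
        rw [if_pos (show (-1 : Int) < 0 by norm_num)]
      rw [hA3, hB3]
      -- the labelled cell lies at or beyond i (cells before i are already claimed)
      have hui : i ≤ u := by
        by_contra hlt
        exact hlow u hun (by omega) hclaimed
      have hcold : own[u]'(by omega) = -1 := by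
        rw [← List.getD_eq_getElem own 0 (by omega)]
        exact hclaimed
      have hcnt2 : cnt + 1 = (((own.set u (i : Int)).count ((i : Nat) : Int) : Nat) : Int) := by
        rw [List.count_set (by omega)]
        simp only [hcold]
        rw [if_neg (fun h => absurd (beq_iff_eq.mp h) (by omega)), if_pos (by simp)]
        rw [hcnt]
        omega
      have hfuel2 : (own.set u (i : Int)).count (-1) + 1 ≤ m := by
        rw [List.count_set (by omega)]
        simp only [hcold]
        rw [if_pos (by simp), if_neg (fun h => absurd (beq_iff_eq.mp h) (by omega))]
        have hpos : 0 < own.count (-1) := by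
          rw [List.count_pos_iff]
          rw [← hcold]
          exact List.getElem_mem _
        omega
      -- B's next argument is the value of cards at the freshly claimed cell, minus one
      have hargB2 : PySem.List.pyGetD cards w 0 - 1 = cards.getD u 0 - 1 := by
        rw [pyGetD_of_pyGet? cards w _ 0 hgc2]
      have hih := ih (vis.set u true) (own.set u (i : Int)) (cnt + 1) w
        (by rw [List.length_set]; exact hvl) (by rw [List.length_set]; exact hol)
        hw0 hw1 ?_ ?_ ?_ hcnt2 hfuel2
      · obtain ⟨vis', own', hA, hB, hvl', hol', hrel', hval', hstab', hcpres'⟩ := hih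
        rw [hargB2] at hB
        refine ⟨vis', own', hA, hB, hvl', hol', hrel', hval', ?_, ?_⟩
        · intro j hj hne
          have hju : j ≠ u := by
            intro h
            rw [h] at hne
            exact hne hclaimed
          have h1 : (own.set u (i : Int)).getD j 0 = own.getD j 0 := by
            rw [getD_set own u (by omega) _ j 0, if_neg hju]
          rw [← h1]
          exact hstab' j hj (by rw [h1]; exact hne)
        · intro b hbi hbneg
          rw [hcpres' b hbi hbneg, List.count_set (by omega)]
          simp only [hcold]
          rw [if_neg (fun h => hbneg (beq_iff_eq.mp h).symm),
            if_neg (fun h => hbi (beq_iff_eq.mp h).symm)]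
          omega
      · -- rel after the twin update
        intro j hj
        rw [getD_set vis u (by omega) true j false, getD_set own u (by omega) _ j 0]
        by_cases hj' : j = u
        · rw [if_pos hj', if_pos hj']
          constructor
          · intro _
            omega
          · intro _
            rfl
        · rw [if_neg hj', if_neg hj']
          exact hrel j hj
      · -- values after the update
        intro j hj
        rw [getD_set own u (by omega) _ j 0]
        by_cases hj' : j = u
        · rw [if_pos hj']
          right
          refine ⟨by positivity, by rw [hj']; exact_mod_cast hui, le_rfl⟩
        · rw [if_neg hj']
          exact hval j hj
      · -- cells before i stay claimed
        intro j hj hji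
        rw [getD_set own u (by omega) _ j 0]
        by_cases hj' : j = u
        · rw [if_pos hj']
          omega
        · rw [if_neg hj']
          exact hlow j hj hji
    · -- the tested cell is already claimed: both loops stop
      have hvtrue : vis.getD u false = true := (hrel u hun).mpr hclaimed
      have ho0 : 0 ≤ own.getD u 0 := by
        rcases hval u hun with h | h
        · exact absurd h hclaimed
        · exact h.1
      rw [hvtrue] at hgv
      have hA3 : aWhile cards (m+1) vis cnt t = (vis, cnt) := by
        simp only [hA2, hgv]
        rfl
      have hB3 : bClaim cards i (m+1) own (PySem.List.pyGetD cards t 0 - 1) = own := by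
        simp only [hstepB, hgo]
        rw [if_neg (by omega)]
      rw [hA3, hB3]
      exact ⟨vis, own, by rw [hcnt], rfl, hvl, hol, hrel, hval,
        fun j hj _ => rfl, fun b _ _ => rfl⟩

-- ===== one outer step =====

lemma stepAB (cards : List Int)
    (hb : ∀ x ∈ cards, 1 - (cards.length : Int) ≤ x ∧ x ≤ (cards.length : Int))
    (i : Nat) (hi : i < cards.length) (vis : List Bool) (own : List Int) (ans : List Int)
    (hvl : vis.length = cards.length) (hol : own.length = cards.length)
    (hrel : ∀ j, j < cards.length → (vis.getD j false = true ↔ own.getD j 0 ≠ -1))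
    (hval : ∀ j, j < cards.length → own.getD j 0 = -1 ∨
      (0 ≤ own.getD j 0 ∧ own.getD j 0 ≤ (j : Int) ∧ own.getD j 0 < (i : Int)))
    (hlow : ∀ j, j < i → own.getD j 0 ≠ -1)
    (hans : ans = ((List.range i).filter (fun (s : Nat) => own.getD s 0 == (s : Int))).map
      (fun (s : Nat) => ((own.count (s : Int) : Nat) : Int))) :
    ∃ vis' own',
      stepA cards cards.length (vis, ans) i = (vis', ((List.range (i+1)).filter
        (fun (s : Nat) => own'.getD s 0 == (s : Int))).map
        (fun (s : Nat) => ((own'.count (s : Int) : Nat) : Int)))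
      ∧ bClaim cards i (cards.length + 1) own ((i : Nat) : Int) = own'
      ∧ vis'.length = cards.length ∧ own'.length = cards.length
      ∧ (∀ j, j < cards.length → (vis'.getD j false = true ↔ own'.getD j 0 ≠ -1))
      ∧ (∀ j, j < cards.length → own'.getD j 0 = -1 ∨
          (0 ≤ own'.getD j 0 ∧ own'.getD j 0 ≤ (j : Int) ∧ own'.getD j 0 < ((i+1 : Nat) : Int)))
      ∧ (∀ j, j < i + 1 → own'.getD j 0 ≠ -1) := by
  have hgvi : PySem.List.pyGet? vis ((i : Nat) : Int) = some (vis.getD i false) := by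
    rw [PySem.List.pyGet?_natCast, List.getElem?_eq_getElem (by omega),
      List.getD_eq_getElem vis false (by omega)]
  have hgoi : PySem.List.pyGet? own ((i : Nat) : Int) = some (own.getD i 0) := by
    rw [PySem.List.pyGet?_natCast, List.getElem?_eq_getElem (by omega),
      List.getD_eq_getElem own 0 (by omega)]
  have hstepB0 : bClaim cards i (cards.length + 1) own ((i : Nat) : Int)
      = (match PySem.List.pyGet? own ((i : Nat) : Int) with
        | none => own
        | some o =>
          if o < 0 then
            match PySem.List.pyGet? cards ((i : Nat) : Int) with
            | none => PySem.List.pySetD own ((i : Nat) : Int) (i : Int)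
            | some c => bClaim cards i cards.length
                (PySem.List.pySetD own ((i : Nat) : Int) (i : Int)) (c - 1)
          else own) := rfl
  by_cases hcl : own.getD i 0 = -1
  · -- i is unclaimed: A starts a walk there, B runs the same claim chain
    have hvfalse : vis.getD i false = false := by
      rcases Bool.eq_false_or_eq_true (vis.getD i false) with h | h
      · exact absurd hcl ((hrel i hi).mp h)
      · exact h
    have hgci : PySem.List.pyGet? cards ((i : Nat) : Int) = some (cards.getD i 0) := by
      rw [PySem.List.pyGet?_natCast, List.getElem?_eq_getElem (by omega),
        List.getD_eq_getElem cards 0 (by omega)]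
    have hstepA1 : stepA cards cards.length (vis, ans) i
        = ((aWhile cards cards.length (PySem.List.pySetD vis (i : Int) true) 1 (i : Int)).1,
           ans ++ [(aWhile cards cards.length (PySem.List.pySetD vis (i : Int) true) 1 (i : Int)).2]) := by
      unfold stepA
      rw [hgvi, hvfalse]
    have hstepB1 : bClaim cards i (cards.length + 1) own ((i : Nat) : Int)
        = bClaim cards i cards.length (own.set i (i : Int)) (cards.getD i 0 - 1) := by
      rw [hstepB0, hgoi, hcl]
      simp only [hgci]
      rw [if_pos (show (-1 : Int) < 0 by norm_num), PySem.List.pySetD_natCast]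
    have hoim : own[i]'(by omega) = -1 := by
      rw [← List.getD_eq_getElem own 0 (by omega)]
      exact hcl
    have hcnt0 : (1 : Int) = (((own.set i (i : Int)).count ((i : Nat) : Int) : Nat) : Int) := by
      have hzero : own.count ((i : Nat) : Int) = 0 := by
        rw [List.count_eq_zero]
        intro hmem
        obtain ⟨k, hk, hke⟩ := List.mem_iff_getElem.mp hmem
        rcases hval k (by omega) with h | h
        · rw [List.getD_eq_getElem own 0 (by omega)] at h
          omega
        · rw [List.getD_eq_getElem own 0 (by omega)] at h
          omega
      rw [List.count_set (by omega)]
      simp only [hoim, hzero]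
      rw [if_neg (fun h => absurd (beq_iff_eq.mp h) (by omega)), if_pos (by simp)]
      omega
    have hfuel0 : (own.set i (i : Int)).count (-1) + 1 ≤ cards.length := by
      rw [List.count_set (by omega)]
      simp only [hoim]
      rw [if_pos (by simp), if_neg (fun h => absurd (beq_iff_eq.mp h) (by omega))]
      have hpos : 0 < own.count (-1) := by
        rw [List.count_pos_iff, ← hoim]
        exact List.getElem_mem _
      have hle : own.count (-1) ≤ own.length := List.count_le_length
      omega
    have hwalk := walkAB cards hb i hi cards.length (vis.set i true) (own.set i (i : Int))
      1 ((i : Nat) : Int)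
      (by rw [List.length_set]; exact hvl) (by rw [List.length_set]; exact hol)
      (by omega) (by exact_mod_cast hi) ?_ ?_ ?_ hcnt0 hfuel0
    · obtain ⟨vis', own', hA, hB, hvl', hol', hrel', hval', hstab', hcpres'⟩ := hwalk
      rw [pyGetD_of_pyGet? cards _ _ 0 hgci] at hB
      have hsti : (own.set i (i : Int)).getD i 0 = (i : Int) := by
        rw [getD_set own i (by omega) _ i 0, if_pos rfl]
      have howni : own'.getD i 0 = (i : Int) := by
        rw [hstab' i hi (by rw [hsti]; omega), hsti]
      refine ⟨vis', own', ?_, by rw [hstepB1, hB], hvl', hol', hrel', ?_, ?_⟩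
      · -- A's step result is exactly the (i+1)-prefix reading of the final labels
        rw [hstepA1, PySem.List.pySetD_natCast, hA]
        simp only []
        congr 1
        -- ans ++ [count] = mapfilter (i+1) own'
        rw [List.range_succ, List.filter_append, List.map_append, hans]
        congr 1
        · -- the first i entries are unchanged
          have hfeq : ∀ s ∈ List.range i,
              (own.getD s 0 == (s : Int)) = (own'.getD s 0 == (s : Int)) := by
            intro s hs
            have hsi : s < i := List.mem_range.mp hs
            have hclm : own.getD s 0 ≠ -1 := hlow s hsi
            have h1 : (own.set i (i : Int)).getD s 0 = own.getD s 0 := by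
              rw [getD_set own i (by omega) _ s 0, if_neg (by omega)]
            have h2 : own'.getD s 0 = own.getD s 0 := by
              rw [← h1]
              exact hstab' s (by omega) (by rw [h1]; exact hclm)
            rw [h2]
          rw [List.filter_congr hfeq]
          apply List.map_congr_left
          intro s hs
          rw [List.mem_filter] at hs
          have hsi : s < i := List.mem_range.mp hs.1
          have hseq : own'.getD s 0 = (s : Int) := beq_iff_eq.mp hs.2
          have hcnteq : own'.count ((s : Nat) : Int) = own.count ((s : Nat) : Int) := by
            rw [hcpres' ((s : Nat) : Int) (by intro h; omega) (by intro h; omega),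
              List.count_set (by omega)]
            simp only [hoim]
            rw [if_neg (fun h => by have := beq_iff_eq.mp h; omega),
              if_neg (fun h => by have := beq_iff_eq.mp h; omega)]
            omega
          rw [hcnteq]
        · -- position i enters the answer with the walk's count
          rw [List.filter_cons, List.filter_nil]
          rw [if_pos (by simp [-List.getD_eq_getElem?_getD, howni])]
          simp
      · intro j hj
        rcases hval' j hj with h | h
        · exact Or.inl h
        · exact Or.inr ⟨h.1, h.2.1, by omega⟩
      · intro j hj
        rcases Nat.lt_or_ge j i with hji | hji
        · have hclm : own.getD j 0 ≠ -1 := hlow j hji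
          have h1 : (own.set i (i : Int)).getD j 0 = own.getD j 0 := by
            rw [getD_set own i (by omega) _ j 0, if_neg (by omega)]
          rw [hstab' j (by omega) (by rw [h1]; exact hclm), h1]
          exact hclm
        · have hji' : j = i := by omega
          rw [hji', howni]
          omega
    · -- rel after claiming i
      intro j hj
      rw [getD_set vis i (by omega) true j false, getD_set own i (by omega) _ j 0]
      by_cases hj' : j = i
      · rw [if_pos hj', if_pos hj']
        constructor
        · intro _
          omega
        · intro _
          rfl
      · rw [if_neg hj', if_neg hj']
        exact hrel j hj
    · -- values after claiming i
      intro j hj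
      rw [getD_set own i (by omega) _ j 0]
      by_cases hj' : j = i
      · rw [if_pos hj']
        right
        refine ⟨by positivity, by rw [hj'], le_rfl⟩
      · rw [if_neg hj']
        rcases hval j hj with h | h
        · exact Or.inl h
        · exact Or.inr ⟨h.1, h.2.1, by omega⟩
    · -- cells before i stay claimed
      intro j hj hji
      rw [getD_set own i (by omega) _ j 0]
      by_cases hj' : j = i
      · omega
      · rw [if_neg hj']
        exact hlow j hji
  · -- i is already claimed: A skips it, B's claim loop stops at once
    have hvtrue : vis.getD i false = true := (hrel i hi).mpr hcl
    have ho0 : 0 ≤ own.getD i 0 := by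
      rcases hval i hi with h | h
      · exact absurd h hcl
      · exact h.1
    have hoi_lt : own.getD i 0 < (i : Int) := by
      rcases hval i hi with h | h
      · exact absurd h hcl
      · exact h.2.2
    have hstepA1 : stepA cards cards.length (vis, ans) i = (vis, ans) := by
      unfold stepA
      rw [hgvi, hvtrue]
    have hstepB1 : bClaim cards i (cards.length + 1) own ((i : Nat) : Int) = own := by
      rw [hstepB0, hgoi]
      simp only []
      rw [if_neg (by omega)]
    refine ⟨vis, own, ?_, hstepB1, hvl, hol, hrel, ?_, ?_⟩
    · rw [hstepA1, hans]
      congr 1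
      rw [List.range_succ, List.filter_append, List.map_append, List.filter_cons,
        List.filter_nil]
      rw [if_neg (fun h => by have := beq_iff_eq.mp h; omega)]
      simp
    · intro j hj
      rcases hval j hj with h | h
      · exact Or.inl h
      · exact Or.inr ⟨h.1, h.2.1, by omega⟩
    · intro j hj
      rcases Nat.lt_or_ge j i with hji | hji
      · exact hlow j hji
      · have : j = i := by omega
        rw [this]
        exact hcl

-- ===== the outer loops agree =====

lemma loop_inv (cards : List Int)
    (hb : ∀ x ∈ cards, 1 - (cards.length : Int) ≤ x ∧ x ≤ (cards.length : Int)) :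
    ∀ i, i ≤ cards.length →
      ∃ vis own,
        (List.range i).foldl (stepA cards cards.length)
            (List.replicate cards.length false, ([] : List Int))
          = (vis, ((List.range i).filter (fun (s : Nat) => own.getD s 0 == (s : Int))).map
              (fun (s : Nat) => ((own.count (s : Int) : Nat) : Int)))
        ∧ (List.range i).foldl (fun own i => bClaim cards i (cards.length + 1) own (i : Int))
            (List.replicate cards.length (-1)) = own
        ∧ vis.length = cards.length ∧ own.length = cards.length
        ∧ (∀ j, j < cards.length → (vis.getD j false = true ↔ own.getD j 0 ≠ -1))
        ∧ (∀ j, j < cards.length → own.getD j 0 = -1 ∨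
            (0 ≤ own.getD j 0 ∧ own.getD j 0 ≤ (j : Int) ∧ own.getD j 0 < (i : Int)))
        ∧ (∀ j, j < i → own.getD j 0 ≠ -1) := by
  intro i
  induction i with
  | zero =>
    intro _
    refine ⟨List.replicate cards.length false, List.replicate cards.length (-1),
      by simp, rfl, List.length_replicate, List.length_replicate, ?_, ?_, by omega⟩
    · intro j hj
      rw [List.getD_eq_getElem _ false (by simpa using hj),
        List.getD_eq_getElem _ 0 (by simpa using hj), List.getElem_replicate,
        List.getElem_replicate]
      simp
    · intro j hj
      rw [List.getD_eq_getElem _ 0 (by simpa using hj), List.getElem_replicate]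
      exact Or.inl rfl
  | succ i ih =>
    intro hle
    have hi : i < cards.length := by omega
    obtain ⟨vis, own, hfA, hfB, hvl, hol, hrel, hval, hlow⟩ := ih (by omega)
    obtain ⟨vis', own', hsA, hsB, hvl', hol', hrel', hval', hlow'⟩ :=
      stepAB cards hb i hi vis own _ hvl hol hrel hval (fun j hj => hlow j hj) rfl
    refine ⟨vis', own', ?_, ?_, hvl', hol', hrel', hval', hlow'⟩
    · rw [List.range_succ, List.foldl_append, List.foldl_cons, List.foldl_nil, hfA, hsA,
        ← List.range_succ]
    · rw [List.range_succ, List.foldl_append, List.foldl_cons, List.foldl_nil, hfB, hsB]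

-- ===== the two terminal computations agree =====

lemma terminal_eq (ans : List Int) (hne : ans ≠ []) :
    (if ans.length = 1 then (0 : Int)
     else
       match PySem.List.pyGet? (PySem.List.sorted ans (fun x => x) true) 0,
             PySem.List.pyGet? (PySem.List.sorted ans (fun x => x) true) 1 with
       | some a, some b => a * b
       | _, _ => 0)
    = (if ans.length = 1 then (0 : Int)
       else
         match PySem.List.pyGet? (PySem.List.sorted ans (fun x => x) false) (-1),
               PySem.List.pyGet? (PySem.List.sorted ans (fun x => x) false) (-2) with
         | some a, some b => a * b
         | _, _ => 0) := by
  by_cases h1 : ans.length = 1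
  · rw [if_pos h1, if_pos h1]
  · rw [if_neg h1, if_neg h1]
    have h0 : 0 < ans.length := List.length_pos_iff.mpr hne
    have h2 : 2 ≤ ans.length := by omega
    have hal : (PySem.List.sorted ans (fun x => x) false).length = ans.length :=
      PySem.List.length_sorted ans _ false
    -- Python's reverse=True sort of an Int list is the reverse of its ascending sort
    have hrev : (PySem.List.sorted ans (fun x => x) true).reverse
        = PySem.List.sorted ans (fun x => x) false := by
      apply PySem.List.eq_of_perm_of_pairwise_le_of_injective (fun x : Int => x)
        (fun a b h => h)
      · exact ((PySem.List.sorted ans (fun x => x) true).reverse_perm.trans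
          (PySem.List.sorted_perm ans _ true)).trans
          (PySem.List.sorted_perm ans _ false).symm
      · rw [List.pairwise_reverse]
        exact PySem.List.sorted_pairwise_rev ans _
      · exact PySem.List.sorted_pairwise ans _
    have hd : PySem.List.sorted ans (fun x => x) true
        = (PySem.List.sorted ans (fun x => x) false).reverse := by
      rw [← hrev, List.reverse_reverse]
    set a := PySem.List.sorted ans (fun x => x) false with ha
    have hral : a.reverse.length = ans.length := by rw [List.length_reverse, hal]
    rw [hd]
    -- the two heads of the descending sort
    have e0 : PySem.List.pyGet? a.reverse 0 = some (a.reverse[0]'(by omega)) := by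
      have := PySem.List.pyGet?_ofNat a.reverse 0 (by omega)
      simpa using this
    have e1 : PySem.List.pyGet? a.reverse 1 = some (a.reverse[1]'(by omega)) := by
      have := PySem.List.pyGet?_ofNat a.reverse 1 (by omega)
      simpa using this
    -- the two tails of the ascending sort
    have f0 : PySem.List.pyGet? a (-1) = some (a[a.length - 1]'(by omega)) := by
      rw [PySem.List.pyGet?_neg_one, List.getLast?_eq_getElem?,
        List.getElem?_eq_getElem (by omega)]
    have f1 : PySem.List.pyGet? a (-2) = some (a[a.length - 2]'(by omega)) := by
      rw [PySem.List.pyGet?_neg_ofNat a 2 (by omega) (by omega),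
        List.getElem?_eq_getElem (by omega)]
    rw [e0, e1, f0, f1]
    have g0 : a.reverse[0]'(by omega) = a[a.length - 1]'(by omega) := by
      rw [List.getElem_reverse]
      simp
    have g1 : a.reverse[1]'(by omega) = a[a.length - 2]'(by omega) := by
      rw [List.getElem_reverse]
      have hidx : a.length - 1 - 1 = a.length - 2 := by omega
      simp [hidx]
    rw [g0, g1]

-- ===== VERDICT (by name: the statement is the Claim_ definition above) =====
theorem solution_spec : Claim_equal_solution := by
  unfold Claim_equal_solution
  intro cards _ hpre
  obtain ⟨hne, hb⟩ := hpre
  unfold Spec_solution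
  have hn : 0 < cards.length := by
    cases cards with
    | nil => exact absurd rfl hne
    | cons a l => simp
  obtain ⟨vis, own, hfoldA, hfoldB, _, _, _, hval, hlow⟩ := loop_inv cards hb cards.length le_rfl
  -- the final answer list, shared by both programs
  have hfilter : ∀ s, s < cards.length →
      (own.getD s 0 == (s : Int)) = (PySem.List.pyGetD own (s : Int) 0 == (s : Int)) := by
    intro s _
    rw [PySem.List.pyGetD_natCast]
  have hne' : ((List.range cards.length).filter (fun (s : Nat) => own.getD s 0 == (s : Int))).map
      (fun (s : Nat) => ((own.count (s : Int) : Nat) : Int)) ≠ [] := by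
    have h00 : own.getD 0 0 = 0 := by
      rcases hval 0 hn with h | h
      · exact absurd h (hlow 0 hn)
      · omega
    have h0 : 0 ∈ (List.range cards.length).filter (fun (s : Nat) => own.getD s 0 == (s : Int)) := by
      rw [List.mem_filter]
      exact ⟨List.mem_range.mpr hn, by simp [-List.getD_eq_getElem?_getD, h00]⟩
    intro hnil
    rw [List.map_eq_nil_iff] at hnil
    rw [hnil] at h0
    exact absurd h0 (List.not_mem_nil)
  show solution cards = solution_alt cards
  unfold solution solution_alt
  simp only [hfoldA, hfoldB]
  rw [List.filter_congr (fun s hs => (hfilter s (List.mem_range.mp hs)).symm)]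
  exact terminal_eq _ hne'
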